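-- pv_equiv track=rewrite | github.com/AmundStrom/6-semester-UiT | INF-2600 KI2/a1 - Search Algorithms/precode.py | check_heuristic
-- ===== SOURCE A (Python) =====
-- def check_heuristic(config, order):
--
--     # Find the node that has the highest index in the color order
--     val = 0
--     for i in range(len(config)):
--         if order.index(config[i]) > val:
--             val = order.index(config[i])
--
--     # Calculate the difference between the highest index and the rest of the indexes
--     sum = 0
--     for i in range(len(config)):
--         sum += val - order.index(config[i])
--
--     return sum
-- ===== SOURCE B (Python) =====
-- def check_heuristic(config, order):
--     # Count the occurrences of each color in the configuration.
--     count = {}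
--     for c in config:
--         count[c] = count.get(c, 0) + 1
--     # One pass over the color order: at the first occurrence of each color
--     # that the configuration uses, accumulate its index weighted by its
--     # multiplicity and remember the highest such index.
--     seen = set()
--     val = 0
--     total = 0
--     for i, c in enumerate(order):
--         if c in count and c not in seen:
--             seen.add(c)
--             total += count[c] * i
--             val = i
--     # Preserve A's contract: a config color absent from order is a ValueError.
--     missing = [c for c in count if c not in seen]
--     if missing:
--         raise ValueError(f"{missing[0]!r} is not in list")
--     return len(config) * val - total
-- ===== Notes on version B (the rewrite author's own statement) =====
-- stated objective: alternative
-- what changed: Instead of calling order.index inside two scans over config, B builds a multiplicity dictionary of config and makes a single pass over order, accumulating each color's first index weighted by its multiplicity and the maximum used index, returning len(config)*val - total (raising the same ValueError when a config color is absent from order).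
import Mathlib
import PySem

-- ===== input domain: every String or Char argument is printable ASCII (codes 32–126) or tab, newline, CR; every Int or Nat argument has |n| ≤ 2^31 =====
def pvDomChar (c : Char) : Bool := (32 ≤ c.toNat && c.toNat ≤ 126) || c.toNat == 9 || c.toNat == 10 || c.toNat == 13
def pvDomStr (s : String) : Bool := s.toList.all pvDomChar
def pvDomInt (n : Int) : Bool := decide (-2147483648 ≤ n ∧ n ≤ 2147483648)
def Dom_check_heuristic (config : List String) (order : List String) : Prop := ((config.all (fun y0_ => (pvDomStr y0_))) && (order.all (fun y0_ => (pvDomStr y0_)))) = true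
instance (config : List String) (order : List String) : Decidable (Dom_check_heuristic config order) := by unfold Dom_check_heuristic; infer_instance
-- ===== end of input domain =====

-- B drops order.index entirely: a multiplicity dict of config plus ONE pass over order (return value only).

-- ===== PORT A =====
-- order.index(c): under Pre_ every c ∈ order, so index? is some; getD 0 is exact there.
def check_heuristic (config : List String) (order : List String) : Int :=
  let val : Int :=
    (PySem.List.pyRange 0 (config.length : Int) 1).foldl
      (fun val i =>
        let j : Int := (((PySem.List.index? order (PySem.List.pyGetD config i "")).getD 0 : Nat) : Int)
        if j > val then j else val) 0
  let sum : Int :=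
    (PySem.List.pyRange 0 (config.length : Int) 1).foldl
      (fun s i =>
        s + (val - (((PySem.List.index? order (PySem.List.pyGetD config i "")).getD 0 : Nat) : Int))) 0
  sum

-- ===== PORT B =====
-- count = {}; for c in config: count[c] = count.get(c, 0) + 1
-- seen = set(); val = 0; total = 0
-- for i, c in enumerate(order):
--   if c in count and c not in seen: seen.add(c); total += count[c]*i; val = i
-- if any config color was never seen: raise ValueError  (outside Pre_, no value to port)
-- return len(config) * val - total
def check_heuristic_alt (config : List String) (order : List String) : Int :=
  let count : PySem.Dict String Int :=
    config.foldl (fun d c => d.insert c (d.getD c 0 + 1)) PySem.Dict.empty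
  let st : PySem.Set String × Int × Int :=
    (PySem.List.enumerate order).foldl
      (fun (st : PySem.Set String × Int × Int) p =>
        if count.contains p.2 && !(PySem.Set.contains st.1 p.2) then
          (PySem.Set.add st.1 p.2, p.1, st.2.2 + count.getD p.2 0 * p.1)
        else st)
      (PySem.Set.empty, 0, 0)
  (config.length : Int) * st.2.1 - st.2.2

-- ===== PRECONDITION & SPEC =====
-- Pre_ excludes exactly the inputs where Python's order.index raises ValueError (a color not in order).
def Pre_check_heuristic (config : List String) (order : List String) : Prop :=
  ∀ c ∈ config, c ∈ order
instance (config : List String) (order : List String) : Decidable (Pre_check_heuristic config order) := by unfold Pre_check_heuristic; infer_instance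
def pvWitness_check_heuristic : List String × List String := (["red", "blue", "red"], ["blue", "red", "green"])

def Spec_check_heuristic (config : List String) (order : List String) (out : Int) : Prop := out = check_heuristic_alt config order
instance (config : List String) (order : List String) (out : Int) : Decidable (Spec_check_heuristic config order out) := by unfold Spec_check_heuristic; infer_instance

-- ===== CLAIM (what is proved, stated in full; the proofs are below) =====
def Claim_equal_check_heuristic : Prop := ∀ (config : List String) (order : List String), Dom_check_heuristic config order → Pre_check_heuristic config order → Spec_check_heuristic config order (check_heuristic config order)

-- ===== LEMMAS AND PROOFS =====

-- A's max-tracking step IS Int.max over the mapped index list.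
theorem foldl_if_max {α : Type} (g : α → Int) (l : List α) (v0 : Int) :
    l.foldl (fun v c => if g c > v then g c else v) v0 = (l.map g).foldl max v0 := by
  induction l generalizing v0 with
  | nil => rfl
  | cons h t ih =>
      simp only [List.foldl_cons, List.map_cons, ih]
      congr 1
      simp only [max_def]
      split_ifs <;> omega

-- A's accumulation loop in closed form
theorem foldl_sub_closed (val : Int) {α : Type} (g : α → Int) (l : List α) (s0 : Int) :
    l.foldl (fun s c => s + (val - g c)) s0 = s0 + l.length * val - (l.map g).sum := by
  induction l generalizing s0 with
  | nil => simp
  | cons h t ih =>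
      simp only [List.foldl_cons, List.map_cons, ih, List.length_cons, List.sum_cons]
      push_cast
      ring

-- If some element equals k, the fold base may be raised to max v0 k.
theorem foldl_max_absorb (l : List Int) (v0 k : Int) (hk : k ∈ l) :
    l.foldl max v0 = l.foldl max (max v0 k) := by
  induction l generalizing v0 with
  | nil => cases hk
  | cons h t ih =>
      simp only [List.foldl_cons]
      rcases List.mem_cons.mp hk with rfl | hk'
      · congr 1; omega
      · rw [ih _ hk', ih (max v0 h ⊔ k) hk']
        congr 1; simp only [max_def]; split_ifs <;> omega
  

-- Copies of o (whose value f o is already below the base) can be filtered out of a max fold.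
theorem foldl_max_filter (f : String → Int) (o : String) (cs : List String) :
    ∀ v : Int, f o ≤ v →
      (cs.map f).foldl max v = ((cs.filter (fun c => !(c == o))).map f).foldl max v := by
  induction cs with
  | nil => intro v _; rfl
  | cons c t ih =>
      intro v hv
      cases hb : (c == o) with
      | true =>
          have hco : c = o := by simpa using hb
          subst hco
          simp only [List.map_cons, List.foldl_cons, List.filter_cons, hb, Bool.not_true,
            Bool.false_eq_true, if_false]
          rw [max_eq_left hv]
          exact ih v hv
      | false =>
          rw [List.filter_cons, if_pos (by simp [hb])]
          simp only [List.map_cons, List.foldl_cons]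
          exact ih _ (le_trans hv (le_max_left _ _))

-- A map-sum splits into the copies of o and the rest.
theorem map_sum_split (f : String → Int) (o : String) (cs : List String) :
    (cs.map f).sum
      = (cs.count o : Int) * f o + ((cs.filter (fun c => !(c == o))).map f).sum := by
  induction cs with
  | nil => simp
  | cons c t ih =>
      cases hb : (c == o) with
      | true =>
          have hco : c = o := by simpa using hb
          subst hco
          simp only [List.map_cons, List.sum_cons, List.count_cons_self, List.filter_cons, hb,
            Bool.not_true, Bool.false_eq_true, if_false]
          rw [ih]
          push_cast
          ring
      | false =>
          have hco : c ≠ o := by simpa using hb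
          rw [List.filter_cons, if_pos (by simp [hb]), List.count_cons_of_ne hco]
          simp only [List.map_cons, List.sum_cons]
          rw [ih]
          ring

theorem contains_add_eq (s : PySem.Set String) (o c : String) :
    PySem.Set.contains (PySem.Set.add s o) c = (PySem.Set.contains s c || c == o) := by
  rw [Bool.eq_iff_iff]
  simp [PySem.Set.mem_add, beq_iff_eq]

-- The invariant of B's single pass over order: starting at offset k with seen-set s,
-- the loop computes the max and the weighted sum of the first indices (in the suffix os,
-- shifted by k) of the config colors not yet seen.
theorem loop_inv (config : List String) (cnt : PySem.Dict String Int)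
    (hcnt : cnt = PySem.Dict.counter config) :
    ∀ (os : List String) (k : Nat) (s : PySem.Set String) (v0 t0 : Int),
      (∀ c ∈ config, PySem.Set.contains s c = false → c ∈ os) → v0 ≤ (k : Int) →
      ∃ s', (PySem.List.enumerate os (k : Int)).foldl
          (fun (st : PySem.Set String × Int × Int) p =>
            if cnt.contains p.2 && !(PySem.Set.contains st.1 p.2) then
              (PySem.Set.add st.1 p.2, p.1, st.2.2 + cnt.getD p.2 0 * p.1)
            else st) (s, v0, t0)
        = (s',
           ((config.filter (fun c => !(PySem.Set.contains s c))).map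
              (fun c => (k : Int) + (((PySem.List.index? os c).getD 0 : Nat) : Int))).foldl max v0,
           t0 + ((config.filter (fun c => !(PySem.Set.contains s c))).map
              (fun c => (k : Int) + (((PySem.List.index? os c).getD 0 : Nat) : Int))).sum) := by
  intro os
  induction os with
  | nil =>
      intro k s v0 t0 hsub _
      have hnil : config.filter (fun c => !(PySem.Set.contains s c)) = [] := by
        rw [List.filter_eq_nil_iff]
        intro c hc
        intro hb
        have := hsub c hc (by simpa using hb)
        simp at this
      refine ⟨s, ?_⟩
      rw [hnil]
      simp only [PySem.List.enumerate, List.foldl_nil, List.map_nil, List.sum_nil, add_zero]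
  | cons o rest ih =>
      intro k s v0 t0 hsub hv0
      rw [PySem.List.enumerate_cons, List.foldl_cons]
      have hcast : ((k : Int) + 1) = ((k + 1 : Nat) : Int) := by push_cast; ring
      by_cases hcond : (cnt.contains o && !(PySem.Set.contains s o)) = true
      · -- o is a config color seen here for the first time
        have hcond2 := hcond
        rw [Bool.and_eq_true] at hcond2
        have ho : o ∈ config := by
          have h1 := hcond2.1
          rw [hcnt, PySem.Dict.contains_counter] at h1
          simpa using h1
        have hso : PySem.Set.contains s o = false := by
          simpa using hcond2.2
        rw [if_pos hcond]
        have hsub' : ∀ c ∈ config, PySem.Set.contains (PySem.Set.add s o) c = false → c ∈ rest := by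
          intro c hc hb
          rw [contains_add_eq] at hb
          rcases Bool.or_eq_false_iff.mp hb with ⟨hb1, hb2⟩
          have hne : c ≠ o := by simpa using hb2
          have := hsub c hc hb1
          rcases List.mem_cons.mp this with h | h
          · exact absurd h hne
          · exact h
        have hv0' : (k : Int) ≤ ((k + 1 : Nat) : Int) := by push_cast; omega
        obtain ⟨s'', heq⟩ := ih (k + 1) (PySem.Set.add s o) (k : Int)
          (t0 + cnt.getD o 0 * (k : Int)) hsub' hv0'
        rw [hcast, heq]
        refine ⟨s'', ?_⟩
        -- abbreviations
        set P := fun c => !(PySem.Set.contains s c) with hP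
        have hfilter : config.filter (fun c => !(PySem.Set.contains (PySem.Set.add s o) c))
            = (config.filter P).filter (fun c => !(c == o)) := by
          rw [List.filter_filter]
          apply List.filter_congr
          intro c _
          rw [contains_add_eq, Bool.not_or, hP]
          simp only [Bool.and_comm]
        have hmemrest : ∀ c ∈ (config.filter P).filter (fun c => !(c == o)), c ∈ rest := by
          intro c hc
          simp only [List.mem_filter, hP, Bool.not_eq_eq_eq_not, Bool.not_true] at hc
          rcases hc with ⟨⟨hc1, hc2⟩, hc3⟩
          have hne : c ≠ o := by simpa using hc3
          rcases List.mem_cons.mp (hsub c hc1 hc2) with h | h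
          · exact absurd h hne
          · exact h
        have hshift : ∀ c ∈ (config.filter P).filter (fun c => !(c == o)),
            (k : Int) + (((PySem.List.index? (o :: rest) c).getD 0 : Nat) : Int)
              = ((k + 1 : Nat) : Int) + (((PySem.List.index? rest c).getD 0 : Nat) : Int) := by
          intro c hc
          have hne : o ≠ c := by
            intro h; subst h
            simp only [List.mem_filter] at hc
            simp at hc
          obtain ⟨j, hj⟩ := (PySem.List.index?_isSome_iff rest c).mpr (hmemrest c hc) |>
            (fun h => Option.isSome_iff_exists.mp h)
          rw [PySem.List.index?_cons_of_ne rest hne, hj]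
          simp only [Option.map_some, Option.getD_some]
          push_cast; ring
        simp only [Prod.mk.injEq]
        refine ⟨by trivial, ?_, ?_⟩
        · -- max component
          have hos : o ∉ s := by
            intro h
            rw [← PySem.Set.contains_iff] at h
            rw [h] at hso
            cases hso
          have hfo : ((k : Int) + (((PySem.List.index? (o :: rest) o).getD 0 : Nat) : Int)) = (k : Int) := by
            rw [PySem.List.index?_cons_self]; simp
          have homem : (k : Int) ∈ (config.filter P).map
              (fun c => (k : Int) + (((PySem.List.index? (o :: rest) c).getD 0 : Nat) : Int)) := by
            rw [List.mem_map]
            exact ⟨o, by simp [hP, List.mem_filter, ho, hos], hfo⟩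
          have hmax : List.foldl max v0 ((config.filter P).map
                (fun c => (k : Int) + (((PySem.List.index? (o :: rest) c).getD 0 : Nat) : Int)))
              = List.foldl max (k : Int)
                ((config.filter (fun c => !(PySem.Set.contains (PySem.Set.add s o) c))).map
                  (fun c => ((k + 1 : Nat) : Int) + (((PySem.List.index? rest c).getD 0 : Nat) : Int))) := by
            rw [foldl_max_absorb _ v0 (k : Int) homem, max_eq_right hv0, hfilter,
                foldl_max_filter _ o (config.filter P) (k : Int) (le_of_eq hfo)]
            exact congrArg (List.foldl max (k : Int)) (List.map_congr_left hshift)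
          exact hmax.symm
        · -- sum component
          have hos : o ∉ s := by
            intro h
            rw [← PySem.Set.contains_iff] at h
            rw [h] at hso
            cases hso
          have hfo : ((k : Int) + (((PySem.List.index? (o :: rest) o).getD 0 : Nat) : Int)) = (k : Int) := by
            rw [PySem.List.index?_cons_self]; simp
          have hgetD : cnt.getD o 0 = (List.count o config : Int) := by
            rw [hcnt, PySem.Dict.getD_counter]
          have hsum : t0 + ((config.filter P).map
                (fun c => (k : Int) + (((PySem.List.index? (o :: rest) c).getD 0 : Nat) : Int))).sum
              = t0 + cnt.getD o 0 * (k : Int)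
                + ((config.filter (fun c => !(PySem.Set.contains (PySem.Set.add s o) c))).map
                  (fun c => ((k + 1 : Nat) : Int) + (((PySem.List.index? rest c).getD 0 : Nat) : Int))).sum := by
            rw [map_sum_split _ o (config.filter P), hfilter,
                List.map_congr_left hshift,
                List.count_filter (by simp [hP, hos]), hfo, hgetD]
            ring
          exact hsum.symm
      · -- the condition is false: the state is unchanged
        rw [if_neg hcond]
        have hnotboth : ¬ (o ∈ config ∧ PySem.Set.contains s o = false) := by
          intro ⟨h1, h2⟩
          apply hcond
          rw [Bool.and_eq_true]
          constructor
          · rw [hcnt, PySem.Dict.contains_counter]; simpa using h1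
          · simpa using h2
        have hsub' : ∀ c ∈ config, PySem.Set.contains s c = false → c ∈ rest := by
          intro c hc hb
          have hne : c ≠ o := by
            intro h; subst h; exact hnotboth ⟨hc, hb⟩
          rcases List.mem_cons.mp (hsub c hc hb) with h | h
          · exact absurd h hne
          · exact h
        have hv0' : v0 ≤ ((k + 1 : Nat) : Int) := by push_cast; omega
        obtain ⟨s'', heq⟩ := ih (k + 1) s v0 t0 hsub' hv0'
        rw [hcast, heq]
        refine ⟨s'', ?_⟩
        have hshift : ∀ c ∈ config.filter (fun c => !(PySem.Set.contains s c)),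
            (k : Int) + (((PySem.List.index? (o :: rest) c).getD 0 : Nat) : Int)
              = ((k + 1 : Nat) : Int) + (((PySem.List.index? rest c).getD 0 : Nat) : Int) := by
          intro c hc
          simp only [List.mem_filter, Bool.not_eq_eq_eq_not, Bool.not_true] at hc
          rcases hc with ⟨hc1, hc2⟩
          have hne : o ≠ c := by
            intro h; subst h; exact hnotboth ⟨hc1, hc2⟩
          have hmem : c ∈ rest := hsub' c hc1 hc2
          obtain ⟨j, hj⟩ := Option.isSome_iff_exists.mp
            ((PySem.List.index?_isSome_iff rest c).mpr hmem)
          rw [PySem.List.index?_cons_of_ne rest hne, hj]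
          simp only [Option.map_some, Option.getD_some]
          push_cast; ring
        rw [List.map_congr_left hshift]

-- ===== VERDICT (by name: the statement is the Claim_ definition above) =====
theorem check_heuristic_spec : Claim_equal_check_heuristic := by
  intro config order _ hpre
  unfold Spec_check_heuristic check_heuristic check_heuristic_alt
  dsimp only
  -- A side: two scans over config via pyRange/pyGetD become folds over config,
  -- then the closed form n*valA - sum of indices.
  rw [PySem.List.foldl_pyRange_zero_pyGetD' config ""
        (fun (v : Int) c => if ((((PySem.List.index? order c).getD 0 : Nat)) : Int) > v
          then ((((PySem.List.index? order c).getD 0 : Nat)) : Int) else v) 0]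
  set valA : Int := config.foldl
      (fun (v : Int) c => if ((((PySem.List.index? order c).getD 0 : Nat)) : Int) > v
        then ((((PySem.List.index? order c).getD 0 : Nat)) : Int) else v) 0 with hval
  rw [PySem.List.foldl_pyRange_zero_pyGetD' config ""
        (fun (s : Int) c => s + (valA - ((((PySem.List.index? order c).getD 0 : Nat)) : Int))) 0,
      foldl_sub_closed, hval, foldl_if_max]
  -- B side: the dict-building loop is Counter(config), then the loop invariant at k = 0.
  rw [PySem.Dict.foldl_insert_getD_add_one_eq_counter]
  obtain ⟨s', heq⟩ := loop_inv config (PySem.Dict.counter config) rfl order 0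
    PySem.Set.empty 0 0
    (by intro c hc _; exact hpre c hc) (le_refl 0)
  rw [Nat.cast_zero] at heq
  rw [heq]
  have hfilter : config.filter (fun c => !(PySem.Set.contains PySem.Set.empty c)) = config := by
    apply List.filter_eq_self.mpr
    intro c _
    simp [PySem.Set.empty]
  rw [hfilter] at *
  have hmapeq : config.map (fun c => (0 : Int) + (((PySem.List.index? order c).getD 0 : Nat) : Int))
      = config.map (fun c => (((PySem.List.index? order c).getD 0 : Nat) : Int)) := by
    apply List.map_congr_left; intro c _; ring
  simp only [hmapeq]
  ring
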